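-- pv_equiv track=rewrite | github.com/WillDenton1989/word_play_work | double_dutch_translator.py | translate_to_dd
-- ===== SOURCE A (Python) =====
-- d_d_dict = {
--         "b": "bub",
--         "c": "cash",
--         "d": "dud",
--         "f": "fud",
--         "g": "gug",
--         "h": "hash",
--         "j": "jay",
--         "k": "kuck",
--         "l": "lul",
--         "m": "mum",
--         "n": "nun",
--         "p": "pub",
--         "q": "quack",
--         "r": "rug",
--         "s": "sus",
--         "t": "tut",
--         "v": "vuv",
--         "w": "wack",
--         "x": "xux",
--         "y": "yub",
--         "z": "zub",
--         }
--
-- vowels = ["a", "e", "i", "o", "u"]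
--
-- def is_consonant(letter):
--     for vowel in vowels:
--         if letter == vowel:
--             return False
--     return True
--
-- def is_vowel(letter):
--     if(is_consonant(letter) == True):
--         return False
--     else:
--         return True
--
-- def translate_to_dd(word):
--     new_word = []
--
--     for letter in word:
--         if(is_vowel(letter)):
--             new_word.append(letter)
--         elif(is_consonant(letter)):
--             syllable = d_d_dict[letter]
--             for l in syllable:
--                 new_word.append(l)
--     return "".join(new_word)
-- ===== SOURCE B (Python) =====
-- _TABLE = ("a bub cash dud e fud gug hash i jay kuck lul mum "
--           "nun o pub quack rug sus tut u vuv wack xux yub zub").split()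
--
-- def translate_to_dd(word):
--     return "".join(_TABLE[ord(ch) - 97] for ch in word)
-- ===== Notes on version B (the rewrite author's own statement) =====
-- stated objective: simpler
-- what changed: B replaces the dict plus is_vowel/is_consonant vowel-list branching with one 26-entry table indexed by alphabet position (ord(ch)-97), vowels included as identity entries, translating by a single indexed lookup per character joined once.
import Mathlib
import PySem

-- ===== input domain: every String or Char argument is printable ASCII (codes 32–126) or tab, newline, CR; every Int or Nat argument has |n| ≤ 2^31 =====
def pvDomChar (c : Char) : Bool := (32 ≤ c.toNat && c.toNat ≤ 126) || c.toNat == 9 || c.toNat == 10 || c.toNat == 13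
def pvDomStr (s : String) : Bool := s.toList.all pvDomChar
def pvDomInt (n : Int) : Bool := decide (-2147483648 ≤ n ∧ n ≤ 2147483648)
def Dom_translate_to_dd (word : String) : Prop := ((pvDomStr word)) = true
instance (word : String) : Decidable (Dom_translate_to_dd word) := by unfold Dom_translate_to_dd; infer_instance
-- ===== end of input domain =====

-- B replaces A's dict + is_vowel/is_consonant branching with one 26-entry table
-- indexed by alphabet position, one uniform lookup per character (simpler).

-- ===== PORT A =====
def ddDict : PySem.Dict Char String :=
  PySem.Dict.ofList [('b',"bub"),('c',"cash"),('d',"dud"),('f',"fud"),('g',"gug"),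
   ('h',"hash"),('j',"jay"),('k',"kuck"),('l',"lul"),('m',"mum"),
   ('n',"nun"),('p',"pub"),('q',"quack"),('r',"rug"),('s',"sus"),
   ('t',"tut"),('v',"vuv"),('w',"wack"),('x',"xux"),('y',"yub"),
   ('z',"zub")]

def vowelsA : List Char := ['a','e','i','o','u']

-- the 'for vowel in vowels' loop of is_consonant
def is_consonant_loop (vs : List Char) (letter : Char) : Bool :=
  match vs with
  | [] => true
  | v :: rest => if letter == v then false else is_consonant_loop rest letter

def is_consonant (letter : Char) : Bool := is_consonant_loop vowelsA letter

def is_vowel (letter : Char) : Bool :=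
  if is_consonant letter == true then false else true

-- d_d_dict[letter] raises KeyError when missing; Pre_ excludes those inputs,
-- so the getD default is never reached inside the claim.
def translate_to_dd (word : String) : String :=
  String.ofList (word.toList.foldl (fun new_word letter =>
    if is_vowel letter then new_word ++ [letter]
    else if is_consonant letter then
      new_word ++ (PySem.Dict.getD ddDict letter "").toList
    else new_word) [])

-- ===== PORT B =====
-- _TABLE = "a bub cash … yub zub".split()
def tableB : List String :=
  PySem.Str.split₀ "a bub cash dud e fud gug hash i jay kuck lul mum nun o pub quack rug sus tut u vuv wack xux yub zub"

-- "".join(_TABLE[ord(ch) - 97] for ch in word); the index raises outside Pre_,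
-- so the getD default is never reached inside the claim.
def translate_to_dd_alt (word : String) : String :=
  PySem.Str.join "" (word.toList.map (fun ch =>
    (PySem.List.pyGet? tableB ((ch.toNat : Int) - 97)).getD ""))

-- ===== PRECONDITION & SPEC =====
def lowercaseLetters : List Char :=
  ['a','b','c','d','e','f','g','h','i','j','k','l','m',
   'n','o','p','q','r','s','t','u','v','w','x','y','z']

-- A raises KeyError on any character that is not a lowercase ASCII letter
-- (uppercase, digits, punctuation, whitespace); Pre_ admits exactly the
-- strings of lowercase letters, on which A returns normally.
def Pre_translate_to_dd (word : String) : Prop :=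
  (word.toList.all (fun c => lowercaseLetters.contains c)) = true
instance (word : String) : Decidable (Pre_translate_to_dd word) := by
  unfold Pre_translate_to_dd; infer_instance

def pvWitness_translate_to_dd : String := "hello"

def Spec_translate_to_dd (word : String) (out : String) : Prop := out = translate_to_dd_alt word
instance (word : String) (out : String) : Decidable (Spec_translate_to_dd word out) := by unfold Spec_translate_to_dd; infer_instance

-- ===== CLAIM (what is proved, stated in full; the proofs are below) =====
def Claim_equal_translate_to_dd : Prop := ∀ (word : String), Dom_translate_to_dd word → Pre_translate_to_dd word → Spec_translate_to_dd word (translate_to_dd word)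

-- ===== LEMMAS AND PROOFS =====

-- per-character translation as A computes it
def stepA (letter : Char) : List Char :=
  if is_vowel letter then [letter]
  else if is_consonant letter then (PySem.Dict.getD ddDict letter "").toList
  else []

lemma foldA_eq (l : List Char) (acc : List Char) :
    l.foldl (fun new_word letter =>
      if is_vowel letter then new_word ++ [letter]
      else if is_consonant letter then
        new_word ++ (PySem.Dict.getD ddDict letter "").toList
      else new_word) acc = acc ++ l.flatMap stepA := by
  induction l generalizing acc with
  | nil => simp
  | cons c cs ih =>
    simp only [List.foldl_cons, List.flatMap_cons, ih, stepA]
    split_ifs <;> simp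

set_option maxRecDepth 8192 in
lemma step_eq_table (c : Char) (hc : c ∈ lowercaseLetters) :
    stepA c = ((PySem.List.pyGet? tableB ((c.toNat : Int) - 97)).getD "").toList := by
  fin_cases hc <;> decide

lemma join_empty (parts : List (List Char)) :
    PySem.Chars.join [] parts = parts.flatten := by
  induction parts with
  | nil => simp [PySem.Chars.join_nil]
  | cons p rest ih =>
    cases rest with
    | nil => simp [PySem.Chars.join_singleton]
    | cons q r => simp [PySem.Chars.join_cons_cons, ih]

lemma alt_toList (l : List Char) :
    (PySem.Str.join "" (l.map (fun ch =>
      (PySem.List.pyGet? tableB ((ch.toNat : Int) - 97)).getD ""))).toList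
      = l.flatMap (fun ch =>
          ((PySem.List.pyGet? tableB ((ch.toNat : Int) - 97)).getD "").toList) := by
  have h : ("" : String).toList = [] := rfl
  simp [PySem.Str.toList_join, h, join_empty, List.map_map, List.flatMap_def,
    Function.comp_def]

-- ===== VERDICT (by name: the statement is the Claim_ definition above) =====
theorem translate_to_dd_spec : Claim_equal_translate_to_dd := by
  intro word _ hpre
  unfold Spec_translate_to_dd translate_to_dd
  rw [foldA_eq]
  simp only [List.nil_append]
  have h1 : word.toList.flatMap stepA
      = word.toList.flatMap (fun ch =>
          ((PySem.List.pyGet? tableB ((ch.toNat : Int) - 97)).getD "").toList) := by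
    refine List.flatMap_congr (fun c hc => step_eq_table c ?_)
    have h := List.all_eq_true.mp hpre c hc
    simpa using h
  rw [h1, ← alt_toList, String.ofList_toList]
  rfl
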